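-- pv_equiv track=rewrite | github.com/rrnewton/mtg-forge-rs | .beads/ingest_inbox.py | parse_setext_markdown
-- ===== SOURCE A (Python) =====
-- from typing import List, Tuple, Optional
--
-- def parse_setext_markdown(content: str) -> List[Tuple[str, str]]:
--     """
--     Parse setext-style markdown headers and return list of (title, body) tuples.
--
--     Setext headers use underlines:
--       Title
--       =====
--
--       Body text...
--     """
--     sections = []
--     lines = content.split('\n')
--
--     i = 0
--     while i < len(lines):
--         # Look for setext header (line followed by === or ---)
--         if i + 1 < len(lines):
--             current_line = lines[i].strip()
--             next_line = lines[i + 1].strip()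
--
--             # Check if next line is all = or all -
--             if current_line and (
--                 (next_line and all(c == '=' for c in next_line)) or
--                 (next_line and all(c == '-' for c in next_line))
--             ):
--                 # Found a header
--                 title = current_line
--                 i += 2  # Skip title and underline
--
--                 # Collect body until next header or end
--                 body_lines = []
--                 while i < len(lines):
--                     # Check if we hit another header
--                     if i + 1 < len(lines):
--                         peek_current = lines[i].strip()
--                         peek_next = lines[i + 1].strip()
--                         if peek_current and (
--                             (peek_next and all(c == '=' for c in peek_next)) or
--                             (peek_next and all(c == '-' for c in peek_next))
--                         ):
--                             # Next header found, stop collecting body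
--                             break
--
--                     body_lines.append(lines[i])
--                     i += 1
--
--                 # Join body and strip leading/trailing whitespace
--                 body = '\n'.join(body_lines).strip()
--                 sections.append((title, body))
--                 continue
--
--         i += 1
--
--     return sections
-- ===== SOURCE B (Python) =====
-- from typing import List, Tuple
--
-- def _is_header(lines, i):
--     """lines[i] is a non-blank title and lines[i+1] a non-empty run of '=' or '-'."""
--     cur = lines[i].strip()
--     nxt = lines[i + 1].strip()
--     return bool(cur) and bool(nxt) and (all(c == '=' for c in nxt) or all(c == '-' for c in nxt))
--
-- def parse_setext_markdown(content: str) -> List[Tuple[str, str]]: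
--     lines = content.split('\n')
--     n = len(lines)
--     # pass 1: greedy scan for header start indices (skip consumed underline lines)
--     starts = []
--     i = 0
--     while i + 1 < n:
--         if _is_header(lines, i):
--             starts.append(i)
--             i += 2
--         else:
--             i += 1
--     # pass 2: each section's body runs to the next header start (or the end)
--     out = []
--     for k, h in enumerate(starts):
--         stop = starts[k + 1] if k + 1 < len(starts) else n
--         body = '\n'.join(lines[h + 2:stop]).strip()
--         out.append((lines[h].strip(), body))
--     return out
-- ===== Notes on version B (the rewrite author's own statement) =====
-- stated objective: simpler
-- what changed: Replaced A's nested while-loops (inner body-collection loop that re-runs the header test line by line) with two flat passes: a greedy scan recording header start indices, then one slicing pass cutting each body at the next recorded start.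
import Mathlib
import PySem

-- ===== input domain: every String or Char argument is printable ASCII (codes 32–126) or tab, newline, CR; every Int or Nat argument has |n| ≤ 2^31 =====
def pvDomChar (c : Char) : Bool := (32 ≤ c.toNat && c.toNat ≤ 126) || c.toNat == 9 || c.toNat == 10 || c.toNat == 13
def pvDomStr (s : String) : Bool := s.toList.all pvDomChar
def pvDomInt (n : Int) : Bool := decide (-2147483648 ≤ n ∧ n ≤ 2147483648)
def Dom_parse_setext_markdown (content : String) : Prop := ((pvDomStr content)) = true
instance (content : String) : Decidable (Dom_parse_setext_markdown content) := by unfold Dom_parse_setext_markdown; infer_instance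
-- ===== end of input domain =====

-- B replaces A's nested while-loops (inner body-collection loop repeating the header test)
-- by two flat passes: collect header start indices greedily, then cut each body by slicing
-- to the next recorded start.  Objective: simpler; same asymptotic cost.

-- ===== PORT A =====
-- A's header test at position i (the duplicated 'if i+1 < len(lines): …' check of the Python,
-- written once and used at both of A's check sites; truthiness of a str = nonzero length)
def pvChkA (lines : List String) (i : Nat) : Bool :=
  if i + 1 < lines.length then
    let cur := PySem.Str.strip (lines.getD i "")
    let nxt := PySem.Str.strip (lines.getD (i + 1) "")
    (PySem.Str.len cur != 0) &&
      (((PySem.Str.len nxt != 0) && nxt.toList.all (· == '=')) ||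
       ((PySem.Str.len nxt != 0) && nxt.toList.all (· == '-')))
  else false

-- A's inner while-loop: collect body lines from index j until the next header or the end;
-- returns the collected lines and the final index
def pvCollectA (lines : List String) (j : Nat) (body : List String) : List String × Nat :=
  if j < lines.length then
    if pvChkA lines j then (body, j)
    else pvCollectA lines (j + 1) (body ++ [lines.getD j ""])
  else (body, j)
termination_by lines.length - j
decreasing_by omega

-- the final index of the inner loop never moves backwards (termination of the outer loop)
theorem pvCollectA_ge (lines : List String) (j : Nat) (body : List String) :
    j ≤ (pvCollectA lines j body).2 := by
  unfold pvCollectA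
  split
  · split
    · simp
    · have := pvCollectA_ge lines (j + 1) (body ++ [lines.getD j ""])
      omega
  · simp
termination_by lines.length - j
decreasing_by omega

-- A's outer while-loop
def pvGoA (lines : List String) (i : Nat) (acc : List (String × String)) :
    List (String × String) :=
  if _hi : i < lines.length then
    if _hc : pvChkA lines i then
      let title := PySem.Str.strip (lines.getD i "")
      let r := pvCollectA lines (i + 2) []
      pvGoA lines r.2 (acc ++ [(title, PySem.Str.strip (PySem.Str.join "\n" r.1))])
    else pvGoA lines (i + 1) acc
  else acc
termination_by lines.length - i
decreasing_by
  · have := pvCollectA_ge lines (i + 2) []; omega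
  · omega

def parse_setext_markdown (content : String) : List (String × String) :=
  -- content.split('\n'); the separator "\n" is non-empty, so split? is never none
  let lines := (PySem.Str.split? content "\n").getD []
  pvGoA lines 0 []

-- ===== PORT B =====
-- B's header test (_is_header in Source B; guard i+1 < n lives in the loop, not here)
def pvChkB (lines : List String) (i : Nat) : Bool :=
  let cur := PySem.Str.strip (lines.getD i "")
  let nxt := PySem.Str.strip (lines.getD (i + 1) "")
  (PySem.Str.len cur != 0) && (PySem.Str.len nxt != 0) &&
    (nxt.toList.all (· == '=') || nxt.toList.all (· == '-'))

-- pass 1: greedy scan for header start indices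
def pvIdxB (lines : List String) (i : Nat) : List Nat :=
  if i + 1 < lines.length then
    if pvChkB lines i then i :: pvIdxB lines (i + 2)
    else pvIdxB lines (i + 1)
  else []
termination_by lines.length - i
decreasing_by all_goals omega

-- pass 2: each section's body runs up to the next header start (or the end)
def pvSecB (lines : List String) : List Nat → List (String × String)
  | [] => []
  | h :: rest =>
    let stop : Nat := match rest with | [] => lines.length | h2 :: _ => h2
    (PySem.Str.strip (lines.getD h ""),
      PySem.Str.strip (PySem.Str.join "\n"
        (PySem.List.slice lines (some ((h : Int) + 2)) (some (stop : Int)))))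
      :: pvSecB lines rest

def parse_setext_markdown_alt (content : String) : List (String × String) :=
  let lines := (PySem.Str.split? content "\n").getD []
  pvSecB lines (pvIdxB lines 0)

-- ===== PRECONDITION & SPEC =====
def Spec_parse_setext_markdown (content : String) (out : List (String × String)) : Prop := out = parse_setext_markdown_alt content
instance (content : String) (out : List (String × String)) : Decidable (Spec_parse_setext_markdown content out) := by unfold Spec_parse_setext_markdown; infer_instance

-- ===== CLAIM (what is proved, stated in full; the proofs are below) =====
def Claim_equal_parse_setext_markdown : Prop := ∀ (content : String), Dom_parse_setext_markdown content → Spec_parse_setext_markdown content (parse_setext_markdown content)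

-- ===== LEMMAS AND PROOFS =====

-- the two header tests agree under the range guard
theorem pvChk_eq (lines : List String) (i : Nat) (h : i + 1 < lines.length) :
    pvChkA lines i = pvChkB lines i := by
  unfold pvChkA pvChkB
  rw [if_pos h]
  simp only [Bool.and_or_distrib_left, Bool.and_assoc]

theorem pvChkA_false (lines : List String) (i : Nat) (h : ¬ i + 1 < lines.length) :
    pvChkA lines i = false := by
  unfold pvChkA; rw [if_neg h]

-- where the body scan stops according to B's index list
def pvStop (lines : List String) (j : Nat) : Nat :=
  (pvIdxB lines j).headD lines.length

theorem pvIdxB_head_ge (lines : List String) (j : Nat) :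
    ∀ h t, pvIdxB lines j = h :: t → j ≤ h := by
  intro h t he
  rw [pvIdxB] at he
  split at he
  · split at he
    · cases he; omega
    · have := pvIdxB_head_ge lines (j + 1) h t he; omega
  · cases he
termination_by lines.length - j
decreasing_by all_goals omega

-- the greedy scan restarted at a recorded header index reproduces the tail
theorem pvIdxB_restart (lines : List String) (j : Nat) :
    ∀ h t, pvIdxB lines j = h :: t → pvIdxB lines h = h :: t := by
  intro h t he
  rw [pvIdxB] at he
  split at he
  · rename_i hg
    split at he
    · rename_i hc
      cases he
      rw [pvIdxB, if_pos hg, if_pos hc]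
    · exact pvIdxB_restart lines (j + 1) h t he
  · cases he
termination_by lines.length - j
decreasing_by all_goals omega

theorem pvStop_ge (lines : List String) (j : Nat) (hj : j ≤ lines.length) :
    j ≤ pvStop lines j := by
  unfold pvStop
  cases he : pvIdxB lines j with
  | nil => exact hj
  | cons h t => exact pvIdxB_head_ge lines j h t he

-- A's inner loop = the slice of lines from j to the next header start (or the end)
theorem pvCollectA_eq (lines : List String) (j : Nat) (body : List String)
    (hj : j ≤ lines.length) :
    pvCollectA lines j body =
      (body ++ (lines.drop j).take (pvStop lines j - j), pvStop lines j) := by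
  unfold pvCollectA
  split
  · rename_i hlt
    by_cases hc : pvChkA lines j
    · rw [if_pos hc]
      have hg : j + 1 < lines.length := by
        by_contra hn; rw [pvChkA_false lines j hn] at hc; exact absurd hc (by simp)
      have hstop : pvStop lines j = j := by
        unfold pvStop
        rw [pvIdxB, if_pos hg, if_pos (by rw [← pvChk_eq lines j hg]; exact hc)]
        rfl
      rw [hstop]; simp
    · rw [if_neg hc]
      have hstop : pvStop lines j = pvStop lines (j + 1) := by
        unfold pvStop
        by_cases hg : j + 1 < lines.length
        · conv_lhs => rw [pvIdxB]
          rw [if_pos hg, if_neg (by rw [← pvChk_eq lines j hg]; exact hc)]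
        · have h1 : pvIdxB lines j = [] := by rw [pvIdxB, if_neg hg]
          have h2 : pvIdxB lines (j + 1) = [] := by
            rw [pvIdxB, if_neg (by omega)]
          rw [h1, h2]
      rw [pvCollectA_eq lines (j + 1) (body ++ [lines.getD j ""]) (by omega), hstop]
      have hge : j + 1 ≤ pvStop lines (j + 1) := pvStop_ge lines (j + 1) (by omega)
      have hdrop : lines.drop j = lines[j] :: lines.drop (j + 1) :=
        List.drop_eq_getElem_cons (by omega)
      have hgd : lines.getD j "" = lines[j] := by
        simp [List.getD_eq_getElem?_getD, List.getElem?_eq_getElem (by omega : j < lines.length)]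
      rw [hdrop, hgd]
      have htk : pvStop lines (j + 1) - j = (pvStop lines (j + 1) - (j + 1)) + 1 := by omega
      rw [htk, List.take_succ_cons]
      simp
  · rename_i hge
    have hj' : j = lines.length := by omega
    have h1 : pvIdxB lines j = [] := by rw [pvIdxB, if_neg (by omega)]
    unfold pvStop
    rw [h1, hj']
    simp
termination_by lines.length - j
decreasing_by omega

-- the main invariant: A's scanning loop produces B's two-pass result
theorem pvGoA_eq (lines : List String) (i : Nat) (acc : List (String × String)) :
    pvGoA lines i acc = acc ++ pvSecB lines (pvIdxB lines i) := by
  unfold pvGoA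
  split
  · rename_i hi
    by_cases hc : pvChkA lines i
    · rw [dif_pos hc]
      have hg : i + 1 < lines.length := by
        by_contra hn; rw [pvChkA_false lines i hn] at hc; exact absurd hc (by simp)
      have hidx : pvIdxB lines i = i :: pvIdxB lines (i + 2) := by
        rw [pvIdxB, if_pos hg, if_pos (by rw [← pvChk_eq lines i hg]; exact hc)]
      have hco := pvCollectA_eq lines (i + 2) [] (by omega)
      rw [hco]
      have hslice : PySem.List.slice lines (some ((i : Int) + 2)) (some ((pvStop lines (i+2) : Int)))
          = (lines.drop (i + 2)).take (pvStop lines (i + 2) - (i + 2)) := by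
        have : ((i : Int) + 2) = ((i + 2 : Nat) : Int) := by push_cast; ring
        rw [this, PySem.List.slice_natCast]
      cases he : pvIdxB lines (i + 2) with
      | nil =>
        have hstop : pvStop lines (i + 2) = lines.length := by unfold pvStop; rw [he]; rfl
        have hend : pvIdxB lines lines.length = [] := by
          rw [pvIdxB, if_neg (by omega)]
        rw [hstop] at hslice ⊢
        rw [pvGoA_eq lines lines.length _, hend, hidx, he]
        simp only [pvSecB, hslice]
        simp
      | cons h t =>
        have hstop : pvStop lines (i + 2) = h := by unfold pvStop; rw [he]; rfl
        have hh : i + 2 ≤ h := pvIdxB_head_ge lines (i + 2) h t he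
        have hres : pvIdxB lines h = h :: t := pvIdxB_restart lines (i + 2) h t he
        rw [hstop] at hslice ⊢
        rw [pvGoA_eq lines h _, hres, hidx, he]
        simp only [pvSecB, hslice]
        simp
    · rw [dif_neg hc]
      rw [pvGoA_eq lines (i + 1) acc]
      have hsame : pvIdxB lines i = pvIdxB lines (i + 1) := by
        by_cases hg : i + 1 < lines.length
        · conv_lhs => rw [pvIdxB]
          rw [if_pos hg, if_neg (by rw [← pvChk_eq lines i hg]; exact hc)]
        · have h1 : pvIdxB lines i = [] := by rw [pvIdxB, if_neg hg]
          have h2 : pvIdxB lines (i + 1) = [] := by rw [pvIdxB, if_neg (by omega)]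
          rw [h1, h2]
      rw [hsame]
  · rename_i hi
    have h1 : pvIdxB lines i = [] := by rw [pvIdxB, if_neg (by omega)]
    rw [h1]; simp [pvSecB]
termination_by lines.length - i
decreasing_by
  · have := pvCollectA_ge lines (i + 2) []
    rw [pvCollectA_eq lines (i + 2) [] (by omega)] at this
    simp at this
    omega
  · have := pvIdxB_head_ge lines (i + 2) h t he
    omega
  · omega

-- ===== VERDICT (by name: the statement is the Claim_ definition above) =====
theorem parse_setext_markdown_spec : Claim_equal_parse_setext_markdown := by
  intro content _
  unfold Spec_parse_setext_markdown parse_setext_markdown parse_setext_markdown_alt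
  exact pvGoA_eq _ 0 []
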